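-- pv_equiv track=rewrite | github.com/erikqu/WiredSummarizer | fetchpopular.py | remove_refs
-- ===== SOURCE A (Python) =====
-- def remove_refs(input_string):
-- 		tmp=""
-- 		flag = False
-- 		stringbuilder= ""
-- 		stringbuilder = input_string
-- 		for x in input_string:
-- 			if x == "[":
-- 				flag=True
-- 				tmp = tmp+x
-- 			elif flag == True and x == "]":
-- 				tmp=tmp+x
-- 				flag = False
-- 				stringbuilder = stringbuilder.replace(tmp,"")
-- 				tmp=""
-- 				stringbuilder = " ".join(stringbuilder.split())
-- 			elif flag == True:
-- 				tmp=tmp +x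
-- 		return stringbuilder
-- ===== SOURCE B (Python) =====
-- def remove_refs(input_string):
--     # Repeatedly partition the raw input at the bracket characters to slice
--     # out each bracket group, removing it from the running result and
--     # collapsing whitespace, until no complete bracket group is left.
--     result = input_string
--     rest = input_string
--     while True:
--         _, bra, after = rest.partition('[')
--         if not bra:
--             return result
--         body, ket, rest = after.partition(']')
--         if not ket:
--             return result
--         result = " ".join(result.replace(bra + body + ket, "").split())
-- ===== Notes on version B (the rewrite author's own statement) =====
-- stated objective: faster
-- what changed: A is a per-character state machine with tmp/flag accumulation; B never iterates characters: it repeatedly partitions the raw input at the opening and closing bracket characters to slice out each bracket group, applying the same remove-and-collapse step per group.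
import Mathlib
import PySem

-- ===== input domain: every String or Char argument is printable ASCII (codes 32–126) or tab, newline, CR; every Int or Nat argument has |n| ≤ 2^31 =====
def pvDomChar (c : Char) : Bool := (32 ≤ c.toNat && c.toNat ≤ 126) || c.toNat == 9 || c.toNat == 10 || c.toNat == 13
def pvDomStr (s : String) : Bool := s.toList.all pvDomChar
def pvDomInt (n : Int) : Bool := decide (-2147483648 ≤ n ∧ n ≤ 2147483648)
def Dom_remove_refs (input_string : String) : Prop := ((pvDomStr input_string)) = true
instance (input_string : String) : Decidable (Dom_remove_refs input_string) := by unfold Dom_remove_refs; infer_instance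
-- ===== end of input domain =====

-- B replaces A's per-character flag/tmp state machine by a loop that partitions the raw
-- input at the bracket characters to slice out each bracket group (objective: faster).

-- shared helper: the step ' " ".join(sb.replace(g, "").split()) ' that appears verbatim in both sources
def removeCollapse (sb g : List Char) : List Char :=
  PySem.Chars.join [' '] (PySem.Chars.split₀ (PySem.Chars.replace sb g []))

-- ===== PORT A =====
-- A's loop state: (tmp, flag, stringbuilder), all over List Char; replace/split/join via PySem.
def removeRefsStepA (st : List Char × Bool × List Char) (x : Char) : List Char × Bool × List Char :=
  let (tmp, flag, sb) := st
  if x = '[' then (tmp ++ [x], true, sb)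
  else if flag = true ∧ x = ']' then
    ([], false, removeCollapse sb (tmp ++ [x]))
  else if flag = true then (tmp ++ [x], flag, sb)
  else (tmp, flag, sb)

def remove_refs (input_string : String) : String :=
  let r := input_string.toList.foldl removeRefsStepA ([], false, input_string.toList)
  String.ofList r.2.2

-- ===== PORT B =====
-- hand port of Python's s.partition(c) for a one-character separator (exact):
-- (before, found?, after) — found? = false means no separator, before = s, after = "".
def partChar (c : Char) : List Char → List Char × Bool × List Char
  | [] => ([], false, [])
  | x :: xs =>
    if x = c then ([], true, xs)
    else
      let r := partChar c xs
      (x :: r.1, r.2.1, r.2.2)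

-- length facts cited by go's termination proof
lemma partChar_after_le (c : Char) (s : List Char) : (partChar c s).2.2.length ≤ s.length := by
  induction s with
  | nil => simp [partChar]
  | cons x xs ih =>
    by_cases h : x = c
    · simp [partChar, h]
    · simp [partChar, h]; omega

lemma partChar_after_lt (c : Char) (s : List Char) (h : (partChar c s).2.1 = true) :
    (partChar c s).2.2.length < s.length := by
  induction s with
  | nil => simp [partChar] at h
  | cons x xs ih =>
    by_cases hx : x = c
    · simp [partChar, hx]
    · simp [partChar, hx] at h ⊢
      have := ih h
      omega

-- B's while loop: peel off one bracket group per iteration.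
def removeRefsGo (rest result : List Char) : List Char :=
  let p := partChar '[' rest
  if p.2.1 = false then result
  else
    let q := partChar ']' p.2.2
    if q.2.1 = false then result
    else removeRefsGo q.2.2 (removeCollapse result (('[' :: q.1) ++ [']']))
termination_by rest.length
decreasing_by
  have h1 : (partChar '[' rest).2.2.length < rest.length := by
    apply partChar_after_lt
    rename_i hp _
    simpa using hp
  have h2 := partChar_after_le ']' (partChar '[' rest).2.2
  omega

def remove_refs_alt (input_string : String) : String :=
  String.ofList (removeRefsGo input_string.toList input_string.toList)

-- ===== PRECONDITION & SPEC =====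
def Spec_remove_refs (input_string : String) (out : String) : Prop := out = remove_refs_alt input_string
instance (input_string : String) (out : String) : Decidable (Spec_remove_refs input_string out) := by unfold Spec_remove_refs; infer_instance

-- ===== CLAIM (what is proved, stated in full; the proofs are below) =====
def Claim_equal_remove_refs : Prop := ∀ (input_string : String), Dom_remove_refs input_string → Spec_remove_refs input_string (remove_refs input_string)

-- ===== LEMMAS AND PROOFS =====

-- with the flag down, characters other than '[' leave A's state untouched
lemma foldl_no_open (cs : List Char) (h : '[' ∉ cs) (tmp sb : List Char) :
    cs.foldl removeRefsStepA (tmp, false, sb) = (tmp, false, sb) := by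
  induction cs with
  | nil => rfl
  | cons x xs ih =>
    have hx : x ≠ '[' := by intro hx; exact h (by simp [hx])
    have hxs : '[' ∉ xs := fun hm => h (by simp [hm])
    simp only [List.foldl_cons, removeRefsStepA, hx, if_false]
    rw [if_neg (by simp), if_neg (by simp)]
    exact ih hxs

-- with the flag up, characters other than ']' are appended to tmp
lemma foldl_accum (ds : List Char) (h : ']' ∉ ds) (tmp sb : List Char) :
    ds.foldl removeRefsStepA (tmp, true, sb) = (tmp ++ ds, true, sb) := by
  induction ds generalizing tmp with
  | nil => simp
  | cons x xs ih =>
    have hx : x ≠ ']' := by intro hx; exact h (by simp [hx])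
    have hxs : ']' ∉ xs := fun hm => h (by simp [hm])
    by_cases hb : x = '['
    · simp only [List.foldl_cons, removeRefsStepA, hb]
      rw [if_pos (by trivial), ih hxs]; simp
    · simp only [List.foldl_cons, removeRefsStepA, hb, if_false]
      rw [if_neg (by simp [hx]), if_pos (by trivial)]
      rw [ih hxs]; simp

-- partition characterizations
lemma partChar_not_mem (c : Char) (s : List Char) (h : c ∉ s) :
    partChar c s = (s, false, []) := by
  induction s with
  | nil => rfl
  | cons x xs ih =>
    have hx : x ≠ c := by intro hx; exact h (by simp [hx])
    have hxs : c ∉ xs := fun hm => h (by simp [hm])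
    simp [partChar, hx, ih hxs]

lemma partChar_split (c : Char) (pre post : List Char) (h : c ∉ pre) :
    partChar c (pre ++ c :: post) = (pre, true, post) := by
  induction pre with
  | nil => simp [partChar]
  | cons x xs ih =>
    have hx : x ≠ c := by intro hx; exact h (by simp [hx])
    have hxs : c ∉ xs := fun hm => h (by simp [hm])
    simp [partChar, hx, ih hxs]

-- split a list at the first occurrence of a character
lemma exists_first_split (c : Char) (cs : List Char) (h : c ∈ cs) :
    ∃ pre post, cs = pre ++ c :: post ∧ c ∉ pre := by
  induction cs with
  | nil => cases h
  | cons x xs ih =>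
    by_cases hx : x = c
    · exact ⟨[], xs, by simp [hx], by simp⟩
    · have hm : c ∈ xs := by
        rcases List.mem_cons.mp h with h1 | h1
        · exact absurd h1.symm hx
        · exact h1
      obtain ⟨pre, post, heq, hpre⟩ := ih hm
      exact ⟨x :: pre, post, by simp [heq], by
        simp only [List.mem_cons, not_or]
        exact ⟨fun hc => hx hc.symm, hpre⟩⟩

-- the correspondence: A's fold from a clean state equals B's partition loop
lemma fold_eq_go (n : ℕ) : ∀ (cs : List Char), cs.length ≤ n → ∀ (sb : List Char),
    (cs.foldl removeRefsStepA ([], false, sb)).2.2 = removeRefsGo cs sb := by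
  induction n with
  | zero =>
    intro cs hcs sb
    have : cs = [] := List.eq_nil_of_length_eq_zero (Nat.le_zero.mp hcs)
    subst this
    simp [removeRefsGo, partChar]
  | succ n ih =>
    intro cs hcs sb
    by_cases h1 : '[' ∈ cs
    · obtain ⟨pre, post, rfl, hpre⟩ := exists_first_split '[' cs h1
      have hpart1 : partChar '[' (pre ++ '[' :: post) = (pre, true, post) :=
        partChar_split '[' pre post hpre
      by_cases h2 : ']' ∈ post
      · obtain ⟨mid, rest, rfl, hmid⟩ := exists_first_split ']' post h2
        have hpart2 : partChar ']' (mid ++ ']' :: rest) = (mid, true, rest) :=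
          partChar_split ']' mid rest hmid
        -- A side
        have hA : ((pre ++ '[' :: (mid ++ ']' :: rest)).foldl removeRefsStepA
            ([], false, sb)).2.2
            = (rest.foldl removeRefsStepA
                ([], false, removeCollapse sb (('[' :: mid) ++ [']']))).2.2 := by
          rw [List.foldl_append, foldl_no_open pre hpre]
          simp only [List.foldl_cons, removeRefsStepA]
          rw [if_pos (by trivial), List.foldl_append, List.nil_append,
            foldl_accum mid hmid]
          simp only [List.foldl_cons, removeRefsStepA]
          rw [if_neg (by decide), if_pos (by simp)]
          simp
        -- B side
        have hB : removeRefsGo (pre ++ '[' :: (mid ++ ']' :: rest)) sb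
            = removeRefsGo rest (removeCollapse sb (('[' :: mid) ++ [']'])) := by
          rw [removeRefsGo]
          simp [hpart1, hpart2]
        rw [hA, hB]
        apply ih
        have := hcs
        simp only [List.length_append, List.length_cons] at this
        omega
      · -- '[' found but no ']' after it: builder unchanged
        have hpart2 : partChar ']' post = (post, false, []) := partChar_not_mem ']' post h2
        have hA : ((pre ++ '[' :: post).foldl removeRefsStepA ([], false, sb)).2.2 = sb := by
          rw [List.foldl_append, foldl_no_open pre hpre]
          simp only [List.foldl_cons, removeRefsStepA]
          rw [if_pos (by trivial), List.nil_append, foldl_accum post h2]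
        have hB : removeRefsGo (pre ++ '[' :: post) sb = sb := by
          rw [removeRefsGo]
          simp [hpart1, hpart2]
        rw [hA, hB]
    · have hpart1 : partChar '[' cs = (cs, false, []) := partChar_not_mem '[' cs h1
      have hA : (cs.foldl removeRefsStepA ([], false, sb)).2.2 = sb := by
        rw [foldl_no_open cs h1]
      have hB : removeRefsGo cs sb = sb := by
        rw [removeRefsGo]; simp [hpart1]
      rw [hA, hB]

-- ===== VERDICT (by name: the statement is the Claim_ definition above) =====
theorem remove_refs_spec : Claim_equal_remove_refs := by
  intro s _
  unfold Spec_remove_refs remove_refs remove_refs_alt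
  exact congrArg String.ofList (fold_eq_go s.toList.length s.toList le_rfl s.toList)
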